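-- pv_equiv track=rewrite | github.com/Predrag777/Akinator_prototype | DatasetCreator/generator.py | diet_data
-- ===== SOURCE A (Python) =====
-- def diet_data(data):# Need more optimization
--     arr=[]
--     for i in data:
--         if "Carnivore" in i:
--             arr.append(1)
--         elif "Herbivore" in i:
--             arr.append(2)
--         elif "Insectivore" in i:
--             arr.append(3)
--         elif "Omnivore" in i:
--             arr.append(4)
--         elif "Carnivore" not in i and "Piscivore" in i:
--             arr.append(5)
--         elif "Filter Feeder":
--             arr.append(6)
--     return arr
-- ===== SOURCE B (Python) =====
-- # Reverse-priority overwrite passes: start all-6, each later pass (higher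
-- # priority keyword) overwrites matches, so the final value is the code of the
-- # highest-priority keyword occurring in the string.
-- def diet_data(data):
--     res = [6] * len(data)
--     for kw, code in [("Piscivore", 5), ("Omnivore", 4), ("Insectivore", 3),
--                      ("Herbivore", 2), ("Carnivore", 1)]:
--         res = [code if kw in s else r for s, r in zip(data, res)]
--     return res
-- ===== Notes on version B (the rewrite author's own statement) =====
-- stated objective: alternative
-- what changed: Replaces the per-element if/elif first-match cascade by staged overwrite passes: an all-6 result list is rewritten once per keyword in reverse priority order, so the highest-priority match written last determines each entry.
import Mathlib
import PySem

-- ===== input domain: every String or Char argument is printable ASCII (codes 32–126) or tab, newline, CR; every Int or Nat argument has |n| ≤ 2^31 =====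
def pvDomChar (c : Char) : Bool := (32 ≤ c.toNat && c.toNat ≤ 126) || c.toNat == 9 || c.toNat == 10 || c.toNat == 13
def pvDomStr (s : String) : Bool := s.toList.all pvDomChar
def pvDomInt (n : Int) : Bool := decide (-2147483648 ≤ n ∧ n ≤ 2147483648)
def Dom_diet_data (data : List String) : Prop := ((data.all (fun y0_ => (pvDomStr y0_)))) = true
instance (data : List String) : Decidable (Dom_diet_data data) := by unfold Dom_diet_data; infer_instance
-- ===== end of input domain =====

-- B replaces A's per-element if/elif cascade by staged overwrite passes over an all-6
-- list, one pass per keyword in reverse priority order (alternative decomposition).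

-- ===== PORT A =====
def diet_data (data : List String) : List Int :=
  data.foldl (fun arr i =>
    if PySem.Str.isIn "Carnivore" i then arr ++ [1]
    else if PySem.Str.isIn "Herbivore" i then arr ++ [2]
    else if PySem.Str.isIn "Insectivore" i then arr ++ [3]
    else if PySem.Str.isIn "Omnivore" i then arr ++ [4]
    else if ¬ PySem.Str.isIn "Carnivore" i ∧ PySem.Str.isIn "Piscivore" i then arr ++ [5]
    else arr ++ [6]) []   -- 'elif "Filter Feeder":' tests a truthy nonempty string, so this branch always fires

-- ===== PORT B =====
-- one overwrite pass: where kw occurs in data[j], res[j] becomes code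
def dietPass (data : List String) (res : List Int) (kw : String) (code : Int) : List Int :=
  (data.zip res).map (fun p => if PySem.Str.isIn kw p.1 then code else p.2)

def diet_data_alt (data : List String) : List Int :=
  ([("Piscivore", 5), ("Omnivore", 4), ("Insectivore", 3),
    ("Herbivore", 2), ("Carnivore", 1)] : List (String × Int)).foldl
    (fun res p => dietPass data res p.1 p.2) (List.replicate data.length 6)

-- ===== PRECONDITION & SPEC =====
def Spec_diet_data (data : List String) (out : List Int) : Prop := out = diet_data_alt data
instance (data : List String) (out : List Int) : Decidable (Spec_diet_data data out) := by unfold Spec_diet_data; infer_instance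

-- ===== CLAIM (what is proved, stated in full; the proofs are below) =====
def Claim_equal_diet_data : Prop := ∀ (data : List String), Dom_diet_data data → Spec_diet_data data (diet_data data)

-- ===== LEMMAS AND PROOFS =====

-- a pass applied to data.map f is data.map of the pointwise overwrite
theorem dietPass_map (data : List String) (f : String → Int) (kw : String) (code : Int) :
    dietPass data (data.map f) kw code
      = data.map (fun s => if PySem.Str.isIn kw s then code else f s) := by
  induction data with
  | nil => rfl
  | cons x xs ih => simp [dietPass, List.zip] at ih ⊢; exact ih

-- B's staged passes compute the pointwise first-match cascade
def dietCascade (s : String) : Int :=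
  if PySem.Str.isIn "Carnivore" s then 1
  else if PySem.Str.isIn "Herbivore" s then 2
  else if PySem.Str.isIn "Insectivore" s then 3
  else if PySem.Str.isIn "Omnivore" s then 4
  else if PySem.Str.isIn "Piscivore" s then 5 else 6

theorem diet_alt_map (data : List String) :
    diet_data_alt data = data.map dietCascade := by
  have h0 : List.replicate data.length (6 : Int) = data.map (fun _ => 6) := by
    simp [List.map_const']
  simp only [diet_data_alt, List.foldl, h0, dietPass_map]
  rfl

-- A's cascade body appends exactly [dietCascade x]
theorem diet_body (i : String) :
    (if PySem.Str.isIn "Carnivore" i then ([1] : List Int)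
     else if PySem.Str.isIn "Herbivore" i then [2]
     else if PySem.Str.isIn "Insectivore" i then [3]
     else if PySem.Str.isIn "Omnivore" i then [4]
     else if ¬ PySem.Str.isIn "Carnivore" i ∧ PySem.Str.isIn "Piscivore" i then [5]
     else [6]) = [dietCascade i] := by
  unfold dietCascade
  split_ifs <;> simp_all

-- A's foldl with a growing accumulator produces acc ++ the pointwise cascade
theorem diet_foldl (data : List String) (acc : List Int) :
    data.foldl (fun arr i =>
      if PySem.Str.isIn "Carnivore" i then arr ++ [1]
      else if PySem.Str.isIn "Herbivore" i then arr ++ [2]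
      else if PySem.Str.isIn "Insectivore" i then arr ++ [3]
      else if PySem.Str.isIn "Omnivore" i then arr ++ [4]
      else if ¬ PySem.Str.isIn "Carnivore" i ∧ PySem.Str.isIn "Piscivore" i then arr ++ [5]
      else arr ++ [6]) acc
    = acc ++ data.map dietCascade := by
  induction data generalizing acc with
  | nil => simp
  | cons x xs ih =>
    have hx := diet_body x
    simp only [List.foldl, List.map]
    split_ifs at hx ⊢ <;> simp_all [List.append_assoc]

-- ===== VERDICT (by name: the statement is the Claim_ definition above) =====
theorem diet_data_spec : Claim_equal_diet_data := by
  intro data _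
  show diet_data data = diet_data_alt data
  rw [diet_alt_map]
  simpa [diet_data] using diet_foldl data []
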